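-- pv_equiv track=rewrite | github.com/ZhouningMan/LeetCodePython | mscodility/MoveBalls.py | solution
-- ===== SOURCE A (Python) =====
-- MAX_INT = 2 ** 31 - 1
--
-- LIMIT = 10 ** 9
--
-- RED = 'R'
--
-- def solution(S):
--     red_indices = get_red_indices(S)
--     red_count = len(red_indices)
--     swaps = MAX_INT
--     # Brute force algorithm which wil take
--     # O(W * R) runtime complexity and O(R) space complexity
--     # where W is the total number of white balls and R is the number of red balls
--     # in the worse case where W is close to R, the complexity is about N^2
--
--     # The algorithm is basically pick the first position of Red balls at every possible
--     # location, and count the number of swaps required to have that configuration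
--     # it is correct because the result must be one of the configuration
--     # but unfortunately it is not efficient, and I wasn't able to come up with
--     # an efficient algorithm within the time window
--     for i in range(len(S) - red_count + 1): # pick the start location of first red ball
--         j = i
--         tmp = 0
--         # count the number of swaps required to reach the given configuration
--         for red_index in red_indices:
--             tmp += abs(red_index - j)
--             j += 1
--         # optimize the solution
--         swaps = min(swaps, tmp)
--     return swaps if swaps < LIMIT else -1
--
-- def get_red_indices(S):
--     indices = []
--     for i in range(len(S)):
--         if S[i] == RED:
--             indices.append(i)
--     return indices
-- ===== SOURCE B (Python) =====
-- def solution(S):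
--     # O(n): positions of red balls, rank-shifted; the abs-sum is minimized at the median
--     d = []
--     k = 0
--     for i, ch in enumerate(S):
--         if ch == 'R':
--             d.append(i - k)
--             k += 1
--     if not d:
--         return 0
--     m = d[len(d) // 2]
--     ans = sum(abs(x - m) for x in d)
--     return ans if ans < 10 ** 9 else -1
-- ===== Notes on version B (the rewrite author's own statement) =====
-- stated objective: faster
-- what changed: replaces the brute-force scan over every possible start position (O(W*R)) by the rank-shifted-index median: d[k] = k-th red index minus k, answer = sum of |d[k] - median(d)|, computed in one pass
import Mathlib
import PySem

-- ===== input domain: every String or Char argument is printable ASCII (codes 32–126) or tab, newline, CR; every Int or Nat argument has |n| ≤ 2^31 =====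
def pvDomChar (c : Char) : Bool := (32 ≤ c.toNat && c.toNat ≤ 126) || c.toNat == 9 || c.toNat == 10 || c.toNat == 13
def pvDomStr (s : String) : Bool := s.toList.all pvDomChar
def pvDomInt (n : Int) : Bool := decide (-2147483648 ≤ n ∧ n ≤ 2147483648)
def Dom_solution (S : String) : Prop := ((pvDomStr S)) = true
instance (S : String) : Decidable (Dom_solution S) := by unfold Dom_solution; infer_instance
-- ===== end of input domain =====

-- B replaces A's brute-force scan over all start positions by the rank-shifted-index
-- median (one pass); measured asymptotically faster.

-- ===== PORT A =====
def MAX_INT : Int := 2 ^ 31 - 1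
def LIMIT : Int := 10 ^ 9

def get_red_indices (S : String) : List Int :=
  (PySem.List.pyRange 0 (PySem.Str.len S) 1).foldl
    (fun acc i => if PySem.Str.pyGet? S i = some 'R' then acc ++ [i] else acc) []

def solution (S : String) : Int :=
  let red_indices := get_red_indices S
  let red_count : Int := red_indices.length
  let swaps :=
    (PySem.List.pyRange 0 (PySem.Str.len S - red_count + 1) 1).foldl
      (fun swaps i =>
        -- j starts at i, tmp at 0; tmp += |red_index - j|; j += 1
        let jt := red_indices.foldl (fun (p : Int × Int) r => (p.1 + 1, p.2 + |r - p.1|)) (i, 0)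
        min swaps jt.2)
      MAX_INT
  if swaps < LIMIT then swaps else -1

-- ===== PORT B =====
-- one pass over the characters: i = position, k = number of reds seen so far
def buildD : List Char → Int → Int → List Int
  | [], _, _ => []
  | c :: t, i, k => if c = 'R' then (i - k) :: buildD t (i + 1) (k + 1) else buildD t (i + 1) k

def solution_alt (S : String) : Int :=
  let d := buildD S.toList 0 0
  if d = [] then 0
  else
    let m := d.getD (d.length / 2) 0   -- d[len(d)//2]; index is in range since d ≠ []
    let ans := (d.map (fun x => |x - m|)).sum
    if ans < 10 ^ 9 then ans else -1

-- ===== PRECONDITION & SPEC =====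
def Spec_solution (S : String) (out : Int) : Prop := out = solution_alt S
instance (S : String) (out : Int) : Decidable (Spec_solution S out) := by unfold Spec_solution; infer_instance

-- ===== CLAIM (what is proved, stated in full; the proofs are below) =====
def Claim_equal_solution : Prop := ∀ (S : String), Dom_solution S → Spec_solution S (solution S)

-- ===== LEMMAS AND PROOFS =====

-- spec helpers
def reds : List Char → Int → List Int
  | [], _ => []
  | c :: t, i => if c = 'R' then i :: reds t (i + 1) else reds t (i + 1)

def dshift : List Int → Int → List Int
  | [], _ => []
  | r :: t, k => (r - k) :: dshift t (k + 1)

def sumAbs (d : List Int) (c : Int) : Int := (d.map (fun x => |x - c|)).sum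

def cnt (d : List Int) (c : Int) : Int := ((d.filter (fun x => x ≤ c)).length : Int)

lemma buildD_eq_dshift (cs : List Char) : ∀ i k, buildD cs i k = dshift (reds cs i) k := by
  induction cs with
  | nil => intro i k; simp [buildD, reds, dshift]
  | cons c t ih =>
    intro i k
    by_cases h : c = 'R' <;> simp [buildD, reds, dshift, h, ih]

lemma length_dshift (rs : List Int) : ∀ k, (dshift rs k).length = rs.length := by
  induction rs with
  | nil => intro k; rfl
  | cons r t ih => intro k; simp [dshift, ih]

lemma length_reds_le (cs : List Char) : ∀ i, (reds cs i).length ≤ cs.length := by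
  induction cs with
  | nil => intro i; simp [reds]
  | cons c t ih =>
    intro i
    by_cases h : c = 'R' <;> simp [reds, h] <;> have := ih (i + 1) <;> omega

lemma dshift_mem_bounds (cs : List Char) : ∀ (i k : Int) x, x ∈ dshift (reds cs i) k →
    i - k ≤ x ∧ x ≤ i - k + ((cs.length : Int) - ((reds cs i).length : Int)) := by
  induction cs with
  | nil => intro i k x hx; simp [reds, dshift] at hx
  | cons c t ih =>
    intro i k x hx
    by_cases h : c = 'R'
    · simp only [reds, h, if_pos, dshift, List.mem_cons] at hx ⊢
      rcases hx with rfl | hx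
      · have := length_reds_le t (i + 1)
        constructor
        · omega
        · simp only [List.length_cons]
          push_cast
          omega
      · have := ih (i + 1) (k + 1) x hx
        simp only [List.length_cons]
        push_cast at this ⊢
        omega
    · simp only [reds, h, if_neg, not_false_iff] at hx ⊢
      have := ih (i + 1) k x hx
      simp only [List.length_cons]
      push_cast at this ⊢
      omega

lemma dshift_sorted (cs : List Char) : ∀ (i k : Int), (dshift (reds cs i) k).Pairwise (· ≤ ·) := by
  induction cs with
  | nil => intro i k; simp [reds, dshift]
  | cons c t ih =>
    intro i k
    by_cases h : c = 'R'
    · simp only [reds, h, if_pos, dshift]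
      refine List.pairwise_cons.mpr ⟨?_, ih (i + 1) (k + 1)⟩
      intro x hx
      have := dshift_mem_bounds t (i + 1) (k + 1) x hx
      omega
    · simp only [reds, h, if_neg, not_false_iff]
      exact ih (i + 1) k

lemma inner_fold_eq (rs : List Int) : ∀ (j t k : Int),
    (rs.foldl (fun (p : Int × Int) r => (p.1 + 1, p.2 + |r - p.1|)) (j, t)).2
      = t + sumAbs (dshift rs k) (j - k) := by
  induction rs with
  | nil => intro j t k; simp [sumAbs, dshift]
  | cons r tl ih =>
    intro j t k
    simp only [List.foldl_cons]
    rw [ih (j + 1) (t + |r - j|) (k + 1)]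
    simp only [dshift, sumAbs, List.map_cons, List.sum_cons]
    have h1 : r - k - (j - k) = r - j := by ring
    have h2 : j + 1 - (k + 1) = j - k := by ring
    rw [h1, h2]; ring

lemma sumAbs_succ (d : List Int) (c : Int) :
    sumAbs d (c + 1) = sumAbs d c + 2 * cnt d c - d.length := by
  induction d with
  | nil => simp [sumAbs, cnt]
  | cons x t ih =>
    simp only [sumAbs, cnt, List.map_cons, List.sum_cons, List.filter_cons] at ih ⊢
    by_cases h : x ≤ c
    · simp only [h, decide_true, if_pos, List.length_cons, List.length_cons]
      push_cast
      have : |x - (c + 1)| = |x - c| + 1 := by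
        rw [abs_of_nonpos (by omega), abs_of_nonpos (by omega)]; ring
      omega
    · simp only [h, decide_false, if_neg, Bool.false_eq_true, not_false_iff, List.length_cons]
      push_cast
      have : |x - (c + 1)| = |x - c| - 1 := by
        rw [abs_of_nonneg (by omega), abs_of_nonneg (by omega)]; ring
      omega

-- count bounds at the median index
lemma cnt_ge_of_median (d : List Int) (hne : d ≠ []) (hs : d.Pairwise (· ≤ ·))
    (c : Int) (hc : d.getD (d.length / 2) 0 ≤ c) : (d.length : Int) ≤ 2 * cnt d c := by
  have hpos : 0 < d.length := List.length_pos_of_ne_nil hne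
  have hi : d.length / 2 < d.length := Nat.div_lt_self hpos one_lt_two
  rw [List.getD_eq_getElem d 0 hi] at hc
  have hs' := List.pairwise_iff_getElem.mp hs
  have htake : (d.take (d.length / 2 + 1)).filter (fun x => x ≤ c) = d.take (d.length / 2 + 1) := by
    rw [List.filter_eq_self]
    intro x hx
    rcases List.mem_iff_getElem.mp hx with ⟨idx, hidx, hxe⟩
    have hidx' : idx < d.length / 2 + 1 := lt_of_lt_of_le hidx (by simp)
    rw [List.getElem_take] at hxe
    have hxd : x = d[idx]'(by omega) := hxe.symm
    rcases Nat.lt_or_ge idx (d.length / 2) with hlt | hge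
    · have := hs' idx (d.length / 2) (by omega) hi hlt
      simp only [decide_eq_true_eq]
      omega
    · have : idx = d.length / 2 := by omega
      subst this
      simp only [decide_eq_true_eq]
      omega
  have hsub : ((d.take (d.length / 2 + 1)).filter (fun x => x ≤ c)).length
      ≤ (d.filter (fun x => x ≤ c)).length :=
    ((List.take_sublist _ d).filter _).length_le
  rw [htake, List.length_take] at hsub
  unfold cnt
  omega

lemma cnt_le_of_median (d : List Int) (hne : d ≠ []) (hs : d.Pairwise (· ≤ ·))
    (c : Int) (hc : c < d.getD (d.length / 2) 0) : 2 * cnt d c ≤ (d.length : Int) := by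
  have hpos : 0 < d.length := List.length_pos_of_ne_nil hne
  have hi : d.length / 2 < d.length := Nat.div_lt_self hpos one_lt_two
  rw [List.getD_eq_getElem d 0 hi] at hc
  have hs' := List.pairwise_iff_getElem.mp hs
  have hdrop : (d.drop (d.length / 2)).filter (fun x => x ≤ c) = [] := by
    rw [List.filter_eq_nil_iff]
    intro x hx
    rcases List.mem_iff_getElem.mp hx with ⟨idx, hidx, hxe⟩
    rw [List.getElem_drop] at hxe
    have hle : d[d.length / 2] ≤ d[d.length / 2 + idx]'(by
        rw [List.length_drop] at hidx; omega) := by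
      rcases Nat.eq_zero_or_pos idx with rfl | hposidx
      · simp
      · exact hs' _ _ hi (by rw [List.length_drop] at hidx; omega) (by omega)
    simp only [decide_eq_true_eq]
    omega
  have hsplit : d.filter (fun x => x ≤ c)
      = (d.take (d.length / 2)).filter (fun x => x ≤ c)
        ++ (d.drop (d.length / 2)).filter (fun x => x ≤ c) := by
    rw [← List.filter_append, List.take_append_drop]
  have hlen : (d.filter (fun x => x ≤ c)).length ≤ d.length / 2 := by
    rw [hsplit, List.length_append, hdrop]
    simpa using ((d.take (d.length / 2)).length_filter_le _).trans (by simp)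
  unfold cnt
  omega

lemma median_min (d : List Int) (hne : d ≠ []) (hs : d.Pairwise (· ≤ ·)) (c : Int) :
    sumAbs d (d.getD (d.length / 2) 0) ≤ sumAbs d c := by
  set m := d.getD (d.length / 2) 0 with hm
  rcases le_or_gt m c with h | h
  · -- upward: induction on (c - m).toNat
    have key : ∀ n : Nat, sumAbs d m ≤ sumAbs d (m + n) := by
      intro n
      induction n with
      | zero => simp
      | succ p ih =>
        have hstep := sumAbs_succ d (m + p)
        have hcnt := cnt_ge_of_median d hne hs (m + p) (by rw [← hm]; omega)
        push_cast at hstep hcnt ⊢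
        have : (m : Int) + (p + 1) = (m + p) + 1 := by ring
        rw [this]
        omega
    have := key (c - m).toNat
    rwa [Int.toNat_of_nonneg (by omega), show m + (c - m) = c by ring] at this
  · have key : ∀ n : Nat, sumAbs d m ≤ sumAbs d (m - n) := by
      intro n
      induction n with
      | zero => simp
      | succ p ih =>
        have hstep := sumAbs_succ d (m - p - 1)
        have hcnt := cnt_le_of_median d hne hs (m - p - 1) (by rw [← hm]; omega)
        push_cast at hstep hcnt ⊢
        have : (m : Int) - (p + 1) = (m - p - 1) := by ring
        rw [this]
        have h2 : (m : Int) - p - 1 + 1 = m - p := by ring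
        rw [h2] at hstep
        omega
    have := key (m - c).toNat
    rwa [Int.toNat_of_nonneg (by omega), show m - (m - c) = c by ring] at this

-- fold-min lemmas
lemma fold_min_const {g : Int → Int} : ∀ (l : List Int) (a : Int), (∀ x ∈ l, a ≤ g x) →
    l.foldl (fun acc x => min acc (g x)) a = a := by
  intro l
  induction l with
  | nil => intro a _; rfl
  | cons x t ih =>
    intro a h
    simp only [List.foldl_cons]
    rw [min_eq_left (h x (by simp))]
    exact ih a (fun y hy => h y (by simp [hy]))

lemma fold_min_eq {g : Int → Int} (v : Int) : ∀ (l : List Int) (a : Int),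
    (∀ x ∈ l, v ≤ g x) → (∃ x ∈ l, g x = v) →
    l.foldl (fun acc x => min acc (g x)) a = min a v := by
  intro l
  induction l with
  | nil => rintro a _ ⟨x, hx, _⟩; simp at hx
  | cons x t ih =>
    intro a hall hex
    simp only [List.foldl_cons]
    by_cases ht : ∃ y ∈ t, g y = v
    · rw [ih _ (fun y hy => hall y (by simp [hy])) ht]
      have : v ≤ g x := hall x (by simp)
      omega
    · have hx : g x = v := by
        rcases hex with ⟨y, hy, hgy⟩
        rcases List.mem_cons.mp hy with rfl | hy
        · exact hgy
        · exact absurd ⟨y, hy, hgy⟩ ht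
      rw [hx]
      rw [fold_min_const t (min a v) (fun y hy => by
        have := hall y (by simp [hy]); omega)]

lemma gri_loop (S : String) : ∀ (n : Nat) (a : Int) (acc : List Int), 0 ≤ a →
    a + n = PySem.Str.len S →
    (PySem.List.pyRange a (PySem.Str.len S) 1).foldl
      (fun acc i => if PySem.Str.pyGet? S i = some 'R' then acc ++ [i] else acc) acc
      = acc ++ reds (S.toList.drop a.toNat) a := by
  intro n
  induction n with
  | zero =>
    intro a acc ha hlen
    rw [PySem.Str.len_eq] at hlen
    rw [PySem.List.pyRange_one_eq_nil (by rw [PySem.Str.len_eq]; omega)]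
    rw [List.drop_eq_nil_of_le (by omega)]
    simp [reds]
  | succ p ih =>
    intro a acc ha hlen
    have hlen' : a + (p + 1) = (S.toList.length : Int) := by rwa [PySem.Str.len_eq] at hlen
    have hlt : a < PySem.Str.len S := by rw [PySem.Str.len_eq]; omega
    rw [PySem.List.pyRange_one_cons hlt]
    simp only [List.foldl_cons]
    have hna : a.toNat < S.toList.length := by omega
    have hget : PySem.Str.pyGet? S a = some (S.toList[a.toNat]) := by
      have h1 : a = ((a.toNat : Nat) : Int) := by omega
      conv_lhs => rw [h1]
      rw [PySem.Str.pyGet?_natCast, List.getElem?_eq_getElem hna]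
    have hdrop : S.toList.drop a.toNat = S.toList[a.toNat] :: S.toList.drop (a.toNat + 1) :=
      List.drop_eq_getElem_cons hna
    have htn : (a + 1).toNat = a.toNat + 1 := by omega
    rw [hget, hdrop]
    by_cases hc : S.toList[a.toNat] = 'R'
    · rw [if_pos (by rw [hc]), ih (a + 1) (acc ++ [a]) (by omega) (by rw [PySem.Str.len_eq]; omega),
        htn]
      simp [reds, hc]
    · rw [if_neg (by simpa using hc), ih (a + 1) acc (by omega) (by rw [PySem.Str.len_eq]; omega),
        htn]
      simp [reds, hc]

lemma gri_eq (S : String) : get_red_indices S = reds S.toList 0 := by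
  have h := gri_loop S S.toList.length 0 [] (by omega) (by simp [PySem.Str.len_eq])
  simpa [get_red_indices] using h

lemma inner_fold0 (rs : List Int) (j : Int) :
    (rs.foldl (fun (p : Int × Int) r => (p.1 + 1, p.2 + |r - p.1|)) (j, 0)).2
      = sumAbs (dshift rs 0) j := by
  have := inner_fold_eq rs j 0 0
  simpa using this

-- main proof
theorem main_eq (S : String) : solution S = solution_alt S := by
  unfold solution solution_alt
  rw [gri_eq S, buildD_eq_dshift]
  simp only [inner_fold0]
  set rs := reds S.toList 0 with hrs
  set d := dshift rs 0 with hd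
  have hlen0 : 0 ≤ PySem.Str.len S := by rw [PySem.Str.len_eq]; positivity
  by_cases hne : d = []
  · have hrlen : rs.length = 0 := by
      have := length_dshift rs 0
      rw [← hd, hne] at this
      simpa using this.symm
    rw [if_pos hne]
    have hfold := fold_min_eq (g := fun i => sumAbs d i) 0
      (PySem.List.pyRange 0 (PySem.Str.len S - (rs.length : Int) + 1) 1) MAX_INT
      (fun x _ => by simp [hne, sumAbs])
      ⟨0, PySem.List.mem_pyRange_one.mpr ⟨le_refl 0, by omega⟩, by simp [hne, sumAbs]⟩
    rw [hfold]
    norm_num [MAX_INT, LIMIT]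
  · rw [if_neg hne]
    have hsort : d.Pairwise (· ≤ ·) := dshift_sorted S.toList 0 0
    have hmm : ∀ c, sumAbs d (d.getD (d.length / 2) 0) ≤ sumAbs d c := median_min d hne hsort
    have hmem : d.getD (d.length / 2) 0 ∈ d := by
      have hpos : 0 < d.length := List.length_pos_of_ne_nil hne
      rw [List.getD_eq_getElem d 0 (Nat.div_lt_self hpos one_lt_two)]
      exact List.getElem_mem _
    have hb := dshift_mem_bounds S.toList 0 0 _ hmem
    rw [← hrs] at hb
    have hdl : d.length = rs.length := length_dshift rs 0
    have hfold := fold_min_eq (g := fun i => sumAbs d i) (sumAbs d (d.getD (d.length / 2) 0))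
      (PySem.List.pyRange 0 (PySem.Str.len S - (rs.length : Int) + 1) 1) MAX_INT
      (fun x _ => hmm x)
      ⟨d.getD (d.length / 2) 0,
        PySem.List.mem_pyRange_one.mpr ⟨by omega, by rw [PySem.Str.len_eq]; omega⟩, rfl⟩
    rw [hfold]
    simp only [sumAbs, MAX_INT, LIMIT]
    norm_num
    split_ifs <;> omega

-- ===== VERDICT (by name: the statement is the Claim_ definition above) =====
theorem solution_spec : Claim_equal_solution := by
  intro S _
  unfold Spec_solution
  exact main_eq S
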